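-- pv_equiv track=rewrite | github.com/GrabowMar/ThesisAppRework | src/app/engines/orchestrator.py | _infer_container_dir
-- ===== SOURCE A (Python) =====
-- from typing import Any, Dict, List, Optional, Set, Tuple
--
-- def _infer_container_dir(tools: Optional[List[str]]) -> Optional[str]:
--     """Infer container service name directory from selected tools.
--
--     Returns one of: 'static-analyzer', 'dynamic-analyzer', 'performance-tester', 'ai-analyzer'
--     If multiple categories detected, returns 'comprehensive'. If none, returns None.
--     """
--     mapping = {
--         # Static analyzer container tools
--         'bandit': 'static-analyzer', 'safety': 'static-analyzer', 'pylint': 'static-analyzer',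
--         'mypy': 'static-analyzer', 'flake8': 'static-analyzer', 'semgrep': 'static-analyzer',
--         'snyk': 'static-analyzer', 'eslint': 'static-analyzer', 'jshint': 'static-analyzer',
--         'stylelint': 'static-analyzer', 'vulture': 'static-analyzer',
--
--         # Dynamic analyzer container tools (includes integrated ZAP)
--         'curl': 'dynamic-analyzer', 'wget': 'dynamic-analyzer', 'nmap': 'dynamic-analyzer',
--         'zap': 'dynamic-analyzer', 'zap-baseline': 'dynamic-analyzer',
--
--         # Performance tester container tools
--         'ab': 'performance-tester', 'artillery': 'performance-tester', 'aiohttp': 'performance-tester',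
--         'locust': 'performance-tester', 'apache-bench': 'performance-tester',
--
--         # AI analyzer container tools
--         'ai-requirements': 'ai-analyzer',
--         'requirements-scanner': 'ai-analyzer',
--         'requirements-analyzer': 'ai-analyzer'
--     }
--     if not tools:
--         return None
--     services = {mapping.get(t.lower()) for t in tools if mapping.get(t.lower())}
--     services.discard(None)  # type: ignore[arg-type]
--     if not services:
--         return None
--     if len(services) == 1:
--         return next(iter(services))
--     return 'comprehensive'
-- ===== SOURCE B (Python) =====
-- def _infer_container_dir(tools):
--     """Single pass with one tracked category instead of building a set."""
--     mapping = {
--         'bandit': 'static-analyzer', 'safety': 'static-analyzer', 'pylint': 'static-analyzer',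
--         'mypy': 'static-analyzer', 'flake8': 'static-analyzer', 'semgrep': 'static-analyzer',
--         'snyk': 'static-analyzer', 'eslint': 'static-analyzer', 'jshint': 'static-analyzer',
--         'stylelint': 'static-analyzer', 'vulture': 'static-analyzer',
--         'curl': 'dynamic-analyzer', 'wget': 'dynamic-analyzer', 'nmap': 'dynamic-analyzer',
--         'zap': 'dynamic-analyzer', 'zap-baseline': 'dynamic-analyzer',
--         'ab': 'performance-tester', 'artillery': 'performance-tester', 'aiohttp': 'performance-tester',
--         'locust': 'performance-tester', 'apache-bench': 'performance-tester',
--         'ai-requirements': 'ai-analyzer',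
--         'requirements-scanner': 'ai-analyzer',
--         'requirements-analyzer': 'ai-analyzer'
--     }
--     if not tools:
--         return None
--     found = None
--     for t in tools:
--         cat = mapping.get(t.lower())
--         if not cat:
--             continue
--         if found is None:
--             found = cat
--         elif cat != found:
--             return 'comprehensive'
--     return found
-- ===== Notes on version B (the rewrite author's own statement) =====
-- stated objective: alternative
-- what changed: Replaces the set comprehension plus size inspection with a single pass tracking one 'found' category and an early 'comprehensive' return on the first conflicting category.
import Mathlib
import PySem

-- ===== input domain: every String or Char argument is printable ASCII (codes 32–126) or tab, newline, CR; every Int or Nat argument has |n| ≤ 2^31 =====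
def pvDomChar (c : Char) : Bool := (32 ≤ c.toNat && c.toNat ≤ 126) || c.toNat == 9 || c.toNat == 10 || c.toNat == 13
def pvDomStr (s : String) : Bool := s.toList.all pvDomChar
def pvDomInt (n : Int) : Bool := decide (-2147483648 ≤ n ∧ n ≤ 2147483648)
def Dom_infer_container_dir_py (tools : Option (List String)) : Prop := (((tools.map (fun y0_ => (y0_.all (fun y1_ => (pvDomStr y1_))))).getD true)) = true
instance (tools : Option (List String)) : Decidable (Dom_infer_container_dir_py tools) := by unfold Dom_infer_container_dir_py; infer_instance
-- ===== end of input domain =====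

-- B replaces A's set comprehension + size inspection by a single pass holding one found category
-- with an early 'comprehensive' return (objective: alternative decomposition; same cost).

-- the tool→service dict literal, identical in both Pythons
def pvMapping : PySem.Dict String String := PySem.Dict.ofList
  [("bandit", "static-analyzer"), ("safety", "static-analyzer"), ("pylint", "static-analyzer"),
   ("mypy", "static-analyzer"), ("flake8", "static-analyzer"), ("semgrep", "static-analyzer"),
   ("snyk", "static-analyzer"), ("eslint", "static-analyzer"), ("jshint", "static-analyzer"),
   ("stylelint", "static-analyzer"), ("vulture", "static-analyzer"),
   ("curl", "dynamic-analyzer"), ("wget", "dynamic-analyzer"), ("nmap", "dynamic-analyzer"),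
   ("zap", "dynamic-analyzer"), ("zap-baseline", "dynamic-analyzer"),
   ("ab", "performance-tester"), ("artillery", "performance-tester"), ("aiohttp", "performance-tester"),
   ("locust", "performance-tester"), ("apache-bench", "performance-tester"),
   ("ai-requirements", "ai-analyzer"),
   ("requirements-scanner", "ai-analyzer"),
   ("requirements-analyzer", "ai-analyzer")]

-- ===== PORT A =====
-- one step of the set comprehension {mapping.get(t.lower()) for t in tools if mapping.get(t.lower())}
def pvStepA (s : PySem.Set String) (t : String) : PySem.Set String :=
  match PySem.Dict.get? pvMapping (PySem.Str.lower t) with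
  | some c => PySem.Set.add s c
  | none => s

def infer_container_dir_py (tools : Option (List String)) : Option String :=
  match tools with
  | none => none
  | some ts =>
    -- `if not tools: return None`
    if ts = [] then none
    else
      let services : PySem.Set String := ts.foldl pvStepA PySem.Set.empty
      -- services.discard(None) is a no-op here: every collected value is a string
      if services = [] then none
      else if services.length = 1 then services.head?   -- next(iter(services)) on a singleton
      else some "comprehensive"

-- ===== PORT B =====
-- the for-loop of Source B, with `found` as the accumulator; early return on a conflict
def pvLoopB : List String → Option String → Option String
  | [], found => found
  | t :: rest, found =>
    match PySem.Dict.get? pvMapping (PySem.Str.lower t) with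
    | none => pvLoopB rest found
    | some cat =>
      match found with
      | none => pvLoopB rest (some cat)
      | some f => if cat ≠ f then some "comprehensive" else pvLoopB rest (some f)

def infer_container_dir_py_alt (tools : Option (List String)) : Option String :=
  match tools with
  | none => none
  | some ts => if ts = [] then none else pvLoopB ts none

-- ===== PRECONDITION & SPEC =====
def Spec_infer_container_dir_py (tools : Option (List String)) (out : Option String) : Prop := out = infer_container_dir_py_alt tools
instance (tools : Option (List String)) (out : Option String) : Decidable (Spec_infer_container_dir_py tools out) := by unfold Spec_infer_container_dir_py; infer_instance

-- ===== CLAIM (what is proved, stated in full; the proofs are below) =====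
def Claim_equal_infer_container_dir_py : Prop := ∀ (tools : Option (List String)), Dom_infer_container_dir_py tools → Spec_infer_container_dir_py tools (infer_container_dir_py tools)

-- ===== LEMMAS AND PROOFS =====

-- A's final branch on the accumulated set, as a function (proof-side only)
def pvFinish (s : List String) : Option String :=
  if s = [] then none
  else if s.length = 1 then s.head?
  else some "comprehensive"

theorem pvStepA_length_le (s : PySem.Set String) (t : String) : s.length ≤ (pvStepA s t).length := by
  unfold pvStepA
  cases PySem.Dict.get? pvMapping (PySem.Str.lower t) with
  | none => exact le_rfl
  | some c =>
    simp only [PySem.Set.add]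
    split <;> simp

theorem foldl_pvStepA_length_le (ts : List String) (s : PySem.Set String) :
    s.length ≤ (ts.foldl pvStepA s).length := by
  induction ts generalizing s with
  | nil => simp
  | cons t rest ih => exact le_trans (pvStepA_length_le s t) (ih (pvStepA s t))

theorem pvFinish_big (ts : List String) (s : PySem.Set String) (h : 2 ≤ s.length) :
    pvFinish (ts.foldl pvStepA s) = some "comprehensive" := by
  have hle := foldl_pvStepA_length_le ts s
  unfold pvFinish
  have h2 : 2 ≤ (ts.foldl pvStepA s).length := le_trans h hle
  rw [if_neg (by intro hnil; rw [hnil] at h2; simp at h2), if_neg (by omega)]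

theorem pvLoopB_some (ts : List String) (f : String) :
    pvLoopB ts (some f) = pvFinish (ts.foldl pvStepA [f]) := by
  induction ts generalizing f with
  | nil => simp [pvLoopB, pvFinish]
  | cons t rest ih =>
    cases hg : PySem.Dict.get? pvMapping (PySem.Str.lower t) with
    | none => simp only [pvLoopB, List.foldl_cons, pvStepA, hg]; exact ih f
    | some c =>
      simp only [pvLoopB, List.foldl_cons, pvStepA, hg]
      by_cases hc : c = f
      · subst hc
        rw [if_neg (by simp)]
        have : PySem.Set.add [c] c = [c] := by simp [PySem.Set.add]
        rw [this]
        exact ih c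
      · rw [if_pos (by simp [hc])]
        have hadd : PySem.Set.add [f] c = [f, c] := by
          simp [PySem.Set.add, List.contains_eq_mem, hc]
        rw [hadd, pvFinish_big rest [f, c] (by simp)]

theorem pvLoopB_none (ts : List String) :
    pvLoopB ts none = pvFinish (ts.foldl pvStepA PySem.Set.empty) := by
  induction ts with
  | nil => simp [pvLoopB, pvFinish, PySem.Set.empty]
  | cons t rest ih =>
    cases hg : PySem.Dict.get? pvMapping (PySem.Str.lower t) with
    | none => simp only [pvLoopB, List.foldl_cons, pvStepA, hg]; exact ih
    | some c =>
      simp only [pvLoopB, List.foldl_cons, pvStepA, hg]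
      have : PySem.Set.add PySem.Set.empty c = [c] := by simp [PySem.Set.add, PySem.Set.empty]
      rw [this]
      exact pvLoopB_some rest c

-- ===== VERDICT (by name: the statement is the Claim_ definition above) =====
theorem infer_container_dir_py_spec : Claim_equal_infer_container_dir_py := by
  intro tools _
  unfold Spec_infer_container_dir_py infer_container_dir_py infer_container_dir_py_alt
  cases tools with
  | none => rfl
  | some ts =>
    by_cases hts : ts = []
    · simp [hts]
    · simp only [if_neg hts]
      rw [pvLoopB_none ts]
      rfl
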